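-- pv_equiv track=rewrite | github.com/LanternD/NB-Scope | Software/deployment-data-analyzer/Utils.py | find_different_set_csv_png
-- ===== SOURCE A (Python) =====
-- def find_different_set_csv_png(csv_fp_list, png_fp_list):
--     '''
--     Find the files that are not processed.
--     = Find the element of 1st list that are not in 2nd list
--     csv_fp_list: list of current files (csv format)
--     png_fp_list: list of output fig files (png format)
--     Note: each element in the list is a full absolute path
--     '''
--     csv_fn_list = [x.split('/')[-1].split('.')[0] for x in csv_fp_list]
--     png_fn_list = [x.split('/')[-1].split('.')[0] for x in png_fp_list]
--     csv_fn_set = set(csv_fn_list)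
--     processed_idx_list = []
--     for pfn in png_fn_list:
--         if pfn in csv_fn_set:
--             processed_idx_list.append(csv_fn_list.index(pfn))
--     all_index_set = set(range(len(csv_fn_list)))
--     untouched_idx_set = all_index_set - set(processed_idx_list)
--     untouched_idx_list = list(untouched_idx_set)
--     untouched_idx_list.sort()
--     csv_untouched_list = []
--     for idx in untouched_idx_list:
--         csv_untouched_list.append(csv_fp_list[idx])
--     return csv_untouched_list
-- ===== SOURCE B (Python) =====
-- def find_different_set_csv_png(csv_fp_list, png_fp_list):
--     # Single forward pass: keep each csv path unless its basename matches a png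
--     # basename and has not been consumed yet (consume-once, like A's first-index removal).
--     png_bases = {x.split('/')[-1].split('.')[0] for x in png_fp_list}
--     consumed = set()
--     result = []
--     for fp in csv_fp_list:
--         base = fp.split('/')[-1].split('.')[0]
--         if base in png_bases and base not in consumed:
--             consumed.add(base)
--         else:
--             result.append(fp)
--     return result
-- ===== Notes on version B (the rewrite author's own statement) =====
-- stated objective: faster
-- what changed: Replaces A's processed-index bookkeeping (repeated list.index scans over the csv basenames, set(range(n)) difference, sort, gather-by-index) with one forward pass over csv_fp_list that skips a path exactly once per png-matched basename using a consumed set.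
import Mathlib
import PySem

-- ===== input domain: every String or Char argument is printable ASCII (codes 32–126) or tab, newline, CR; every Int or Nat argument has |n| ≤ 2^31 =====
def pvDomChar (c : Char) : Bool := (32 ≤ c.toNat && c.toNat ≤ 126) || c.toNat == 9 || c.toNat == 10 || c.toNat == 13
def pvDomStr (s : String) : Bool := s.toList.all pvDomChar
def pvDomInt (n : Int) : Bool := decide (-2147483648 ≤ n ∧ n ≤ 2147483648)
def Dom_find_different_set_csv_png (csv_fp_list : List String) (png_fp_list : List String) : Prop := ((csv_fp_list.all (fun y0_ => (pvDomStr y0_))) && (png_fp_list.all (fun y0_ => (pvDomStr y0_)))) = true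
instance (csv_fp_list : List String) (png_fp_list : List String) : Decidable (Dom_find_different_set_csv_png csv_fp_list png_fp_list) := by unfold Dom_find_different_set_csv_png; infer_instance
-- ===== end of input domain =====

-- B replaces A's index bookkeeping (list.index scans, set(range) difference, sort, gather) with one
-- forward pass over csv_fp_list and a consumed-set; objective: faster (measured; same return value).

-- ===== PORT A =====
-- x.split('/')[-1].split('.')[0]; both splits are by a nonempty separator, so the split list is
-- nonempty and the [-1]/[0] indexings never raise: pyGetD with default "" is exact here.
def pvBase (x : String) : String :=
  PySem.List.pyGetD
    ((PySem.Str.split? (PySem.List.pyGetD ((PySem.Str.split? x "/").getD []) (-1) "") ".").getD [])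
    0 ""

def find_different_set_csv_png (csv_fp_list : List String) (png_fp_list : List String) : List String :=
  let csv_fn_list := csv_fp_list.map pvBase
  let png_fn_list := png_fp_list.map pvBase
  let csv_fn_set := PySem.Set.ofList csv_fn_list
  -- 'csv_fn_list.index(pfn)' is guarded by membership, so index? is some; getD 0 is exact
  let processed_idx_list : List Int := png_fn_list.foldl
    (fun acc pfn => if PySem.Set.contains csv_fn_set pfn
                    then acc ++ [(((PySem.List.index? csv_fn_list pfn).getD 0 : Nat) : Int)]
                    else acc) []
  let all_index_set : PySem.Set Int := PySem.Set.ofList (PySem.List.pyRange 0 csv_fn_list.length 1)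
  let untouched_idx_set := PySem.Set.diff all_index_set (PySem.Set.ofList processed_idx_list)
  -- list(untouched_idx_set); untouched_idx_list.sort(): the hash iteration order does not matter
  -- because the list is sorted immediately; sorting the Set's element list is exact
  let untouched_idx_list := PySem.List.sorted untouched_idx_set (fun x => x) false
  -- csv_fp_list[idx] with idx drawn from range(len), in range: pyGetD "" is exact
  untouched_idx_list.foldl (fun acc idx => acc ++ [PySem.List.pyGetD csv_fp_list idx ""]) []

-- ===== PORT B =====
def find_different_set_csv_png_alt (csv_fp_list : List String) (png_fp_list : List String) : List String :=
  let png_bases : PySem.Set String := PySem.Set.ofList (png_fp_list.map pvBase)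
  (csv_fp_list.foldl
    (fun (st : List String × PySem.Set String) fp =>
      let base := pvBase fp
      if PySem.Set.contains png_bases base && !(PySem.Set.contains st.2 base)
      then (st.1, PySem.Set.add st.2 base)
      else (st.1 ++ [fp], st.2))
    ([], PySem.Set.empty)).1

-- ===== PRECONDITION & SPEC =====
def Spec_find_different_set_csv_png (csv_fp_list : List String) (png_fp_list : List String) (out : List String) : Prop := out = find_different_set_csv_png_alt csv_fp_list png_fp_list
instance (csv_fp_list : List String) (png_fp_list : List String) (out : List String) : Decidable (Spec_find_different_set_csv_png csv_fp_list png_fp_list out) := by unfold Spec_find_different_set_csv_png; infer_instance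

-- ===== CLAIM (what is proved, stated in full; the proofs are below) =====
def Claim_equal_find_different_set_csv_png : Prop := ∀ (csv_fp_list : List String) (png_fp_list : List String), Dom_find_different_set_csv_png csv_fp_list png_fp_list → Spec_find_different_set_csv_png csv_fp_list png_fp_list (find_different_set_csv_png csv_fp_list png_fp_list)

-- ===== LEMMAS AND PROOFS =====

-- Consume-once filter, structured like B's loop but with the processed prefix's bases 'seen' as a list
def pvF (S : List String) : List String → List String → List String
  | [], _ => []
  | x :: xs, seen =>
    if pvBase x ∈ S ∧ pvBase x ∉ seen then pvF S xs (pvBase x :: seen)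
    else x :: pvF S xs (pvBase x :: seen)

-- Index-based middle form shared by both directions of the proof
def pvMid (S seen : List String) (csv : List String) : List String :=
  ((List.range csv.length).filter (fun i =>
     !decide ((csv.map pvBase).getD i "" ∈ S ∧
              (csv.map pvBase).getD i "" ∉ seen ++ (csv.map pvBase).take i))).map
    (fun i => csv.getD i "")

-- B's foldl unrolls to pvF under the invariant that 'cons' holds exactly the seen bases that are in S
theorem pvB_loop (S : PySem.Set String) (l : List String) (cons : PySem.Set String)
    (seen acc : List String) (hinv : ∀ b, b ∈ cons ↔ b ∈ S ∧ b ∈ seen) :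
    (l.foldl
      (fun (st : List String × PySem.Set String) fp =>
        let base := pvBase fp
        if PySem.Set.contains S base && !(PySem.Set.contains st.2 base)
        then (st.1, PySem.Set.add st.2 base)
        else (st.1 ++ [fp], st.2)) (acc, cons)).1 = acc ++ pvF S l seen := by
  induction l generalizing cons seen acc with
  | nil => simp [pvF]
  | cons x xs ih =>
    simp only [List.foldl_cons, pvF]
    by_cases h : pvBase x ∈ S ∧ pvBase x ∉ seen
    · have hc : (PySem.Set.contains S (pvBase x) && !PySem.Set.contains cons (pvBase x)) = true := by
        have h2 : pvBase x ∉ cons := fun hm => h.2 ((hinv _).mp hm).2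
        simp [h.1, h2]
      rw [if_pos h]
      simp only [hc, if_pos]
      rw [ih (PySem.Set.add cons (pvBase x)) (pvBase x :: seen) acc]
      intro b
      rw [PySem.Set.mem_add]
      simp only [List.mem_cons]
      constructor
      · rintro (hb | rfl)
        · exact ⟨((hinv b).mp hb).1, Or.inr ((hinv b).mp hb).2 ⟩
        · exact ⟨h.1, Or.inl rfl⟩
      · rintro ⟨hbS, (rfl | hbseen)⟩
        · exact Or.inr rfl
        · exact Or.inl ((hinv b).mpr ⟨hbS, hbseen⟩)
    · have hc : (PySem.Set.contains S (pvBase x) && !PySem.Set.contains cons (pvBase x)) = false := by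
        by_cases hS : pvBase x ∈ S
        · have hseen : pvBase x ∈ seen := by
            by_contra hns; exact h ⟨hS, hns⟩
          have : pvBase x ∈ cons := (hinv _).mpr ⟨hS, hseen⟩
          simp [this]
        · simp [hS]
      rw [if_neg h]
      simp only [hc, Bool.false_eq_true, if_false]
      rw [ih cons (pvBase x :: seen) (acc ++ [x])]
      · simp
      · intro b
        rw [hinv b]
        simp only [List.mem_cons]
        constructor
        · rintro ⟨hbS, hbseen⟩; exact ⟨hbS, Or.inr hbseen⟩
        · rintro ⟨hbS, (rfl | hbseen)⟩
          · refine ⟨hbS, ?_⟩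
            rcases not_and_or.mp h with h1 | h2
            · exact absurd hbS h1
            · exact not_not.mp h2
          · exact ⟨hbS, hbseen⟩

theorem pv_mem_swap {α : Type} (a b : α) (s t : List α) :
    a ∈ s ++ b :: t ↔ a ∈ (b :: s) ++ t := by
  simp only [List.mem_append, List.mem_cons]; tauto

theorem pvF_eq_pvMid (S : List String) (csv : List String) (seen : List String) :
    pvF S csv seen = pvMid S seen csv := by
  induction csv generalizing seen with
  | nil => simp [pvF, pvMid]
  | cons x xs ih =>
    simp only [pvMid, List.length_cons, List.range_succ_eq_map, List.map_cons, List.filter_cons,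
      List.getD_cons_zero, List.take_zero, List.append_nil, List.filter_map]
    simp only [pvF]
    by_cases h : pvBase x ∈ S ∧ pvBase x ∉ seen
    · rw [if_pos h,
          if_neg (show ¬(!decide (pvBase x ∈ S ∧ pvBase x ∉ seen)) = true by simp [h.1, h.2]),
          ih (pvBase x :: seen), List.map_map,
          show ((fun i => (x :: xs).getD i "") ∘ Nat.succ) = (fun i => xs.getD i "") from
            funext fun i => rfl,
          pvMid]
      refine congrArg (List.map _) ?_
      apply List.filter_congr
      intro i _
      simp only [Function.comp_apply, List.getD_cons_succ, List.take_succ_cons]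
      exact congrArg Bool.not (decide_eq_decide.mpr
        (and_congr_right fun _ => not_congr (pv_mem_swap _ _ _ _).symm))
    · rw [if_neg h,
          if_pos (show (!decide (pvBase x ∈ S ∧ pvBase x ∉ seen)) = true by simp [h]),
          ih (pvBase x :: seen), List.map_cons, List.map_map,
          show ((fun i => (x :: xs).getD i "") ∘ Nat.succ) = (fun i => xs.getD i "") from
            funext fun i => rfl,
          pvMid]
      refine congrArg₂ _ rfl ?_
      refine congrArg (List.map _) ?_
      apply List.filter_congr
      intro i _
      simp only [Function.comp_apply, List.getD_cons_succ, List.take_succ_cons]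
      exact congrArg Bool.not (decide_eq_decide.mpr
        (and_congr_right fun _ => not_congr (pv_mem_swap _ _ _ _).symm))

-- A's processed-index membership, characterised pointwise: i is removed iff csv base i matches a png
-- base and is the first occurrence of that base
theorem pvKey_iff (fs pn : List String) (i : Nat) (hi : i < fs.length) :
    ((i : Int) ∈ (pn.filter (PySem.Set.ofList fs).contains).map
        (fun p => (((PySem.List.index? fs p).getD 0 : Nat) : Int))) ↔
      (fs[i] ∈ pn ∧ fs[i] ∉ fs.take i) := by
  constructor
  · intro hm
    obtain ⟨p, hpf, hcast⟩ := List.mem_map.mp hm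
    obtain ⟨hp_pn, hp_cont⟩ := List.mem_filter.mp hpf
    have hpfs : p ∈ fs := (PySem.Set.mem_ofList fs p).mp ((PySem.Set.contains_iff _ p).mp hp_cont)
    have hidx : PySem.List.index? fs p = some i := by
      cases hopt : PySem.List.index? fs p with
      | none =>
        rw [PySem.List.index?_eq_none_iff] at hopt
        exact absurd hpfs hopt
      | some k =>
        have : (k : Int) = i := by rw [hopt] at hcast; exact_mod_cast hcast
        have : k = i := by exact_mod_cast this
        rw [this]
    obtain ⟨pre, suf, hdecomp, hlen, hnot⟩ := (PySem.List.index?_eq_some_iff fs p i).mp hidx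
    obtain ⟨hk, hget, _⟩ := PySem.List.getElem_of_index?_eq_some hidx
    have htake : fs.take i = pre := by
      rw [hdecomp, ← hlen]; exact List.take_left
    rw [hget, htake]
    exact ⟨hget ▸ hp_pn, hnot⟩
  · rintro ⟨h1, h2⟩
    refine List.mem_map.mpr ⟨fs[i], List.mem_filter.mpr ⟨h1, ?_⟩, ?_⟩
    · exact (PySem.Set.contains_iff _ _).mpr ((PySem.Set.mem_ofList fs _).mpr (List.getElem_mem hi))
    · have hidx : PySem.List.index? fs fs[i] = some i := by
        refine (PySem.List.index?_eq_some_iff fs fs[i] i).mpr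
          ⟨fs.take i, fs.drop (i + 1), ?_, ?_, h2⟩
        · conv_lhs => rw [← List.take_append_drop i fs]
          rw [List.getElem_cons_drop hi]
        · simp [List.length_take, Nat.min_eq_left (le_of_lt hi)]
      rw [hidx]
      simp

theorem pvA_eq_pvMid (csv png : List String) :
    find_different_set_csv_png csv png = pvMid (PySem.Set.ofList (png.map pvBase)) [] csv := by
  simp only [find_different_set_csv_png]
  rw [PySem.List.foldl_append_if, PySem.Set.ofList_eq_self_of_nodup _ (PySem.List.nodup_pyRange_one _ _)]
  rw [List.nil_append]
  set P : List Int := List.map (fun pfn => (((PySem.List.index? (List.map pvBase csv) pfn).getD 0 : Nat) : Int))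
      (List.filter (PySem.Set.ofList (List.map pvBase csv)).contains (List.map pvBase png)) with hP
  have hpair : ((PySem.List.pyRange 0 ((List.map pvBase csv).length : Int)).filter
      (fun i => !(PySem.Set.ofList P).contains i)).Pairwise (fun a b => a < b) :=
    (PySem.List.pairwise_lt_pyRange_one 0 ((List.map pvBase csv).length : Int)).filter _
  have hperm : ((PySem.List.pyRange 0 ((List.map pvBase csv).length : Int)).filter
      (fun i => !(PySem.Set.ofList P).contains i)).Perm
      (PySem.Set.diff (PySem.List.pyRange 0 ((List.map pvBase csv).length : Int))
        (PySem.Set.ofList P)) := by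
    refine (List.perm_ext_iff_of_nodup (List.Nodup.filter _ (PySem.List.nodup_pyRange_one _ _))
      (PySem.Set.nodup_diff _ _ (PySem.List.nodup_pyRange_one _ _))).mpr ?_
    intro a
    simp [List.mem_filter, PySem.Set.mem_diff]
  rw [PySem.List.sorted_eq_of_perm_of_pairwise_lt _ _ _ hperm hpair,
      PySem.List.foldl_append_singleton_eq_map, List.nil_append]
  rw [PySem.List.pyRange_zero_nat, List.filter_map, List.map_map, List.length_map]
  rw [pvMid]
  refine congrArg₂ List.map (funext fun i => PySem.List.pyGetD_natCast csv i "") ?_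
  apply List.filter_congr
  intro i hi
  have hi' : i < csv.length := List.mem_range.mp hi
  have hfsl : i < (csv.map pvBase).length := by simpa using hi'
  simp only [Function.comp_apply, List.nil_append]
  refine congrArg Bool.not ?_
  rw [Bool.eq_iff_iff, PySem.Set.contains_iff, PySem.Set.mem_ofList, decide_eq_true_eq, hP]
  rw [pvKey_iff (csv.map pvBase) (png.map pvBase) i hfsl]
  rw [List.getD_eq_getElem (csv.map pvBase) "" hfsl]
  simp [PySem.Set.mem_ofList]

theorem pvB_eq_pvMid (csv png : List String) :
    find_different_set_csv_png_alt csv png = pvMid (PySem.Set.ofList (png.map pvBase)) [] csv := by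
  rw [find_different_set_csv_png_alt,
      pvB_loop _ csv PySem.Set.empty [] [] (by simp [PySem.Set.empty]),
      pvF_eq_pvMid]
  simp

-- ===== VERDICT (by name: the statement is the Claim_ definition above) =====
theorem find_different_set_csv_png_spec : Claim_equal_find_different_set_csv_png := by
  intro csv png _
  show _ = _
  rw [pvA_eq_pvMid, pvB_eq_pvMid]
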